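-- pv_equiv track=rewrite | github.com/ymaeda880/text-studio-app | lib/word_analysis/chunking.py | _build_segments_keep_markers
-- ===== SOURCE A (Python) =====
-- from typing import List, Tuple, Iterable
--
-- def _iter_marker_positions(text: str, marker: str) -> Iterable[int]:
--     """
--     marker が現れる先頭インデックスを全てyieldする。
--     """
--     start = 0
--     while True:
--         pos = text.find(marker, start)
--         if pos < 0:
--             break
--         yield pos
--         start = pos + len(marker)
--
-- def _build_segments_keep_markers(text: str, markers: List[str]) -> List[str]:
--     """
--     markers の位置を全て集め、時系列順でセグメント化する。
--     セグメントは「切れ目位置（markerの開始位置）」で分割し、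
--     marker 自体は後続セグメント側に残る（markerが次セグメント先頭に来る）。
--     """
--     t = text.strip()
--     if not t:
--         return []
--
--     # 切れ目候補位置（開始index）を収集
--     cut_positions = set()
--     for m in markers:
--         for pos in _iter_marker_positions(t, m):
--             cut_positions.add(pos)
--
--     if not cut_positions:
--         return [t]
--
--     # 0 は切れ目に入れない（先頭が marker のとき空セグメント化しやすいので）
--     cuts = sorted(p for p in cut_positions if p > 0)
--     if not cuts:
--         return [t]
--
--     # cuts で分割（marker を後ろ側に残す）
--     segs: List[str] = []
--     prev = 0
--     for p in cuts:
--         head = t[prev:p].strip()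
--         if head:
--             segs.append(head)
--         prev = p
--
--     tail = t[prev:].strip()
--     if tail:
--         segs.append(tail)
--
--     return segs
-- ===== SOURCE B (Python) =====
-- from typing import List
--
-- def _build_segments_keep_markers(text: str, markers: List[str]) -> List[str]:
--     """Single left-to-right sweep: per-marker 'next allowed match index' state,
--     segments emitted on the fly at cut positions; no set, no sort, no cut list."""
--     t = text.strip()
--     if not t:
--         return []
--     state = [(0, m) for m in markers]  # (next index at which m may match again, m)
--     segs: List[str] = []
--     seg_start = 0
--     for i in range(len(t)):
--         if any(n <= i and t.startswith(m, i) for n, m in state):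
--             if i > 0:
--                 head = t[seg_start:i].strip()
--                 if head:
--                     segs.append(head)
--                 seg_start = i
--             state = [(i + len(m), m) if n <= i and t.startswith(m, i) else (n, m)
--                      for n, m in state]
--     tail = t[seg_start:].strip()
--     if tail:
--         segs.append(tail)
--     return segs
-- ===== Notes on version B (the rewrite author's own statement) =====
-- stated objective: alternative
-- what changed: B replaces A's three stages (per-marker greedy find-skip collection of positions into a set, a sort, then a split loop over the sorted cuts) by one left-to-right sweep over the text that keeps a per-marker 'next allowed match index' and emits segments on the fly, with no set, no sort and no intermediate cut list.
import Mathlib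
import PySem

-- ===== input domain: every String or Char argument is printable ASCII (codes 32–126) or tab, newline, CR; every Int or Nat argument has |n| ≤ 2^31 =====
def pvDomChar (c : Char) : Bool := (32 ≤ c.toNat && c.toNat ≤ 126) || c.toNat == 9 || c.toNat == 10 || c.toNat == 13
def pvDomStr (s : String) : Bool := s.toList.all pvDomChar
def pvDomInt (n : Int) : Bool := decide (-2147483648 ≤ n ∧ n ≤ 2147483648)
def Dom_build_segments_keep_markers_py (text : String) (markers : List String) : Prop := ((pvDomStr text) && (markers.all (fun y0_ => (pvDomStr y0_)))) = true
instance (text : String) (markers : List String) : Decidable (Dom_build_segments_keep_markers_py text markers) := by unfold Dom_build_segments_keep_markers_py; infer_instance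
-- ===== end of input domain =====

-- B replaces A's three stages (greedy find-skip position collection per marker into a set,
-- a sort, then a split loop over the sorted cuts) by ONE left-to-right sweep over the text that
-- keeps a per-marker "next allowed match index" and emits the segments on the fly — no set,
-- no sort, no intermediate cut list (objective: alternative).

-- ===== PORT A =====
-- the while-True loop body of _iter_marker_positions: pos = t.find(m, start); if pos < 0: break;
-- yield pos; start = pos + len(m).  Fueled: t.length + 1 iterations always suffice for a
-- nonempty marker (markers containing "" are excluded by Pre_, where the Python loop never returns).
def aIterPositions (t m : List Char) : Nat → Nat → List Nat
  | 0, _ => []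
  | fuel+1, start =>
    let pos := PySem.Chars.findFrom t m (start : Int) none
    if pos < 0 then []
    else pos.toNat :: aIterPositions t m fuel (pos.toNat + m.length)

def build_segments_keep_markers_py (text : String) (markers : List String) : List String :=
  let t := PySem.Chars.strip text.toList                 -- t = text.strip()
  if t = [] then []                                      -- if not t: return []
  else
    -- cut_positions = set(); for m in markers: for pos in _iter_marker_positions(t, m): add(pos)
    let cutPositions : PySem.Set Nat :=
      markers.foldl (fun s m => (aIterPositions t m.toList (t.length + 1) 0).foldl PySem.Set.add s) PySem.Set.empty
    if cutPositions = [] then [String.ofList t]          -- if not cut_positions: return [t]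
    else
      -- cuts = sorted(p for p in cut_positions if p > 0)
      let cuts := PySem.List.sorted (cutPositions.filter (fun p => decide (0 < p))) (fun x => x) false
      if cuts = [] then [String.ofList t]                -- if not cuts: return [t]
      else
        -- segs = []; prev = 0; for p in cuts: head = t[prev:p].strip(); if head: segs.append(head); prev = p
        let st := cuts.foldl (fun (st : List (List Char) × Nat) (p : Nat) =>
            let head := PySem.Chars.strip (PySem.List.slice t (some (st.2 : Int)) (some (p : Int)))
            (if head = [] then st.1 else st.1 ++ [head], p)) ([], 0)
        -- tail = t[prev:].strip(); if tail: segs.append(tail)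
        let tail := PySem.Chars.strip (PySem.List.slice t (some (st.2 : Int)) none)
        (if tail = [] then st.1 else st.1 ++ [tail]).map String.ofList

-- ===== PORT B =====
-- one sweep: for i in range(len(t)): if any(n <= i and t.startswith(m, i) for n, m in state):
--   if i > 0: flush t[seg_start:i].strip(); seg_start = i
--   state = [(i + len(m), m) if n <= i and t.startswith(m, i) else (n, m) for n, m in state]
-- (t.startswith(m, i) with 0 ≤ i is: m is a prefix of t[i:])
def build_segments_keep_markers_py_alt (text : String) (markers : List String) : List String :=
  let t := PySem.Chars.strip text.toList                 -- t = text.strip()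
  if t = [] then []                                      -- if not t: return []
  else
    -- state = [(0, m) for m in markers]; segs = []; seg_start = 0
    let fin := (List.range t.length).foldl
      (fun (st : List (Nat × List Char) × List (List Char) × Nat) i =>
        if st.1.any (fun nm => decide (nm.1 ≤ i) && PySem.Chars.startswith (t.drop i) nm.2) then
          (st.1.map (fun nm => if decide (nm.1 ≤ i) && PySem.Chars.startswith (t.drop i) nm.2 then (i + nm.2.length, nm.2) else nm),
           if 0 < i then
             (let head := PySem.Chars.strip (PySem.List.slice t (some (st.2.2 : Int)) (some (i : Int)))
              (if head = [] then st.2.1 else st.2.1 ++ [head], i))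
           else st.2)
        else st)
      (markers.map (fun m => ((0 : Nat), m.toList)), ([], 0))
    -- tail = t[seg_start:].strip(); if tail: segs.append(tail)
    let tail := PySem.Chars.strip (PySem.List.slice t (some (fin.2.2 : Int)) none)
    (if tail = [] then fin.2.1 else fin.2.1 ++ [tail]).map String.ofList

-- ===== PRECONDITION & SPEC =====
-- Pre_ excludes inputs whose stripped text is nonempty while the marker list contains the empty
-- string: on those the Python A loops forever (t.find("", start) returns start and start never
-- advances), so A never returns there.
def Pre_build_segments_keep_markers_py (text : String) (markers : List String) : Prop :=
  PySem.Chars.strip text.toList = [] ∨ ∀ m ∈ markers, m ≠ ""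
instance (text : String) (markers : List String) : Decidable (Pre_build_segments_keep_markers_py text markers) := by
  unfold Pre_build_segments_keep_markers_py; infer_instance

def pvWitness_build_segments_keep_markers_py : String × List String := ("a|b |c", ["|"])

def Spec_build_segments_keep_markers_py (text : String) (markers : List String) (out : List String) : Prop := out = build_segments_keep_markers_py_alt text markers
instance (text : String) (markers : List String) (out : List String) : Decidable (Spec_build_segments_keep_markers_py text markers out) := by unfold Spec_build_segments_keep_markers_py; infer_instance

-- ===== CLAIM (what is proved, stated in full; the proofs are below) =====
def Claim_equal_build_segments_keep_markers_py : Prop := ∀ (text : String) (markers : List String), Dom_build_segments_keep_markers_py text markers → Pre_build_segments_keep_markers_py text markers → Spec_build_segments_keep_markers_py text markers (build_segments_keep_markers_py text markers)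

-- ===== LEMMAS AND PROOFS =====

-- proof-side device: the greedy (non-overlapping) match starts of m in t at indices ≥ i,
-- as produced by a left-to-right scan; it mediates between A's find-skip loop and B's sweep
def bGreedy (t m : List Char) : Nat → Nat → List Nat
  | 0, _ => []
  | fuel+1, i =>
    if i + m.length ≤ t.length then
      if PySem.Chars.startswith (t.drop i) m then i :: bGreedy t m fuel (i + m.length)
      else bGreedy t m fuel (i + 1)
    else []

-- proof-side device: B's per-marker sweep state before step i ("next index at which m may match")
def nextAt (t m : List Char) : Nat → Nat
  | 0 => 0
  | i+1 => if decide (nextAt t m i ≤ i) && PySem.Chars.startswith (t.drop i) m then i + m.length else nextAt t m i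

-- "the sweep matches m at index i"
def matchesAt (t m : List Char) (i : Nat) : Bool :=
  decide (nextAt t m i ≤ i) && PySem.Chars.startswith (t.drop i) m

-- "some marker matches at index i" — B's cut condition
def cutB (t : List Char) (ms : List (List Char)) (i : Nat) : Bool := ms.any (fun m => matchesAt t m i)

-- a prefix occurrence of a nonempty marker fits inside the text
lemma occ_le {t m : List Char} {j : Nat} (hm : m ≠ []) (h : m <+: t.drop j) :
    j + m.length ≤ t.length := by
  have h1 : m.length ≤ (t.drop j).length := h.length_le
  have h2 : 0 < m.length := List.length_pos_iff.mpr hm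
  rw [List.length_drop] at h1
  omega

-- m occurs somewhere in t.drop k iff it has a prefix occurrence at some j ≥ k
lemma infix_drop_iff (t m : List Char) (k : Nat) :
    m <:+: t.drop k ↔ ∃ j, k ≤ j ∧ m <+: t.drop j := by
  rw [← PySem.Chars.isIn_iff_infix, ← PySem.Chars.exists_prefix_drop_iff_isIn]
  constructor
  · rintro ⟨j, hp⟩
    exact ⟨k + j, by omega, by rwa [List.drop_drop] at hp⟩
  · rintro ⟨j, hkj, hp⟩
    refine ⟨j - k, ?_⟩
    rw [List.drop_drop]
    have hjk : k + (j - k) = j := by omega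
    rwa [hjk]

-- t.find(m, i) = i when m occurs at i
lemma findFrom_of_prefix {t m : List Char} {i : Nat} (hi : i ≤ t.length) (h : m <+: t.drop i) :
    PySem.Chars.findFrom t m (i : Int) none = (i : Int) := by
  rw [PySem.Chars.findFrom_natCast t m i hi]
  have hinf : m <:+: t.drop i := h.isInfix
  have hne : PySem.Chars.find (t.drop i) m ≠ -1 := by
    rw [Ne, PySem.Chars.find_eq_neg_one_iff]; exact not_not_intro hinf
  have hnn : 0 ≤ PySem.Chars.find (t.drop i) m := (PySem.Chars.find_nonneg_iff _ _).mpr hinf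
  obtain ⟨hpre, hmin⟩ := PySem.Chars.find_spec hnn
  have h0 : (PySem.Chars.find (t.drop i) m).toNat = 0 := by
    by_contra hc
    exact hmin 0 (by omega) (by simpa using h)
  rw [if_neg hne]
  omega

-- t.find(m, i) = t.find(m, i+1) when m does not occur at i
lemma findFrom_step {t m : List Char} {i : Nat} (hi : i + 1 ≤ t.length) (h : ¬ m <+: t.drop i) :
    PySem.Chars.findFrom t m (i : Int) none = PySem.Chars.findFrom t m ((i + 1 : Nat) : Int) none := by
  have hi' : i ≤ t.length := by omega
  rw [PySem.Chars.findFrom_natCast t m i hi', PySem.Chars.findFrom_natCast t m (i+1) hi]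
  by_cases hinf : m <:+: t.drop (i+1)
  · have hne2 : PySem.Chars.find (t.drop (i+1)) m ≠ -1 := by
      rw [Ne, PySem.Chars.find_eq_neg_one_iff]; exact not_not_intro hinf
    have hnn2 : 0 ≤ PySem.Chars.find (t.drop (i+1)) m := (PySem.Chars.find_nonneg_iff _ _).mpr hinf
    obtain ⟨hpre2, hmin2⟩ := PySem.Chars.find_spec hnn2
    set q := (PySem.Chars.find (t.drop (i+1)) m).toNat with hq
    have hinf1 : m <:+: t.drop i := by
      rw [infix_drop_iff]
      refine ⟨i + 1 + q, by omega, ?_⟩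
      rwa [List.drop_drop] at hpre2
    have hne1 : PySem.Chars.find (t.drop i) m ≠ -1 := by
      rw [Ne, PySem.Chars.find_eq_neg_one_iff]; exact not_not_intro hinf1
    have hnn1 : 0 ≤ PySem.Chars.find (t.drop i) m := (PySem.Chars.find_nonneg_iff _ _).mpr hinf1
    obtain ⟨hpre1, hmin1⟩ := PySem.Chars.find_spec hnn1
    set r := (PySem.Chars.find (t.drop i) m).toNat with hr
    have hr0 : r ≠ 0 := by
      intro hc
      rw [hc] at hpre1
      simp only [List.drop_zero] at hpre1
      exact h hpre1
    have hple : r ≤ q + 1 := by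
      by_contra hc
      refine hmin1 (q+1) (by omega) ?_
      rw [List.drop_drop]
      have he : i + (q + 1) = i + 1 + q := by omega
      rw [he]
      rwa [List.drop_drop] at hpre2
    have hqle : q ≤ r - 1 := by
      by_contra hc
      refine hmin2 (r-1) (by omega) ?_
      rw [List.drop_drop]
      have he : i + 1 + (r - 1) = i + r := by omega
      rw [he]
      rwa [List.drop_drop] at hpre1
    rw [if_neg hne1, if_neg hne2]
    omega
  · have hinf1 : ¬ m <:+: t.drop i := by
      rw [infix_drop_iff]
      rintro ⟨j, hij, hp⟩
      rcases Nat.eq_or_lt_of_le hij with hj | hj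
      · exact h (hj ▸ hp)
      · exact hinf ((infix_drop_iff t m (i+1)).mpr ⟨j, by omega, hp⟩)
    rw [if_pos ((PySem.Chars.find_eq_neg_one_iff _ _).mpr hinf1),
        if_pos ((PySem.Chars.find_eq_neg_one_iff _ _).mpr hinf)]

-- one skip step of A's find-loop
lemma aIter_step {t m : List Char} {i : Nat} (hi : i + 1 ≤ t.length) (h : ¬ m <+: t.drop i) (f : Nat) :
    aIterPositions t m (f + 1) i = aIterPositions t m (f + 1) (i + 1) := by
  simp only [aIterPositions]
  rw [findFrom_step hi h]

-- A's find-loop and the greedy left-to-right scan produce the same position list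
lemma scan_eq {t m : List Char} (hm : m ≠ []) :
    ∀ (K f g i : Nat), i ≤ t.length → t.length - i ≤ K →
      t.length + 1 - i ≤ f → t.length + 1 - i ≤ g →
      aIterPositions t m f i = bGreedy t m g i := by
  have hL : 0 < m.length := List.length_pos_iff.mpr hm
  have top : ∀ f g, 1 ≤ f → 1 ≤ g → aIterPositions t m f t.length = bGreedy t m g t.length := by
    intro f g hf hg
    obtain ⟨f', rfl⟩ : ∃ f', f = f' + 1 := ⟨f - 1, by omega⟩
    obtain ⟨g', rfl⟩ : ∃ g', g = g' + 1 := ⟨g - 1, by omega⟩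
    have hno : PySem.Chars.findFrom t m (t.length : Int) none = -1 := by
      rw [PySem.Chars.findFrom_natCast_eq_neg_one_iff t m t.length le_rfl]
      rw [List.drop_length, List.infix_nil]
      exact hm
    simp only [aIterPositions, bGreedy, hno]
    rw [if_pos (by omega), if_neg (by omega)]
  intro K
  induction K with
  | zero =>
    intro f g i hi hK hf hg
    have hieq : i = t.length := by omega
    subst hieq
    exact top f g (by omega) (by omega)
  | succ K ih =>
    intro f g i hi hK hf hg
    rcases Nat.eq_or_lt_of_le hi with heq | hlt
    · subst heq
      exact top f g (by omega) (by omega)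
    · obtain ⟨f', rfl⟩ : ∃ f', f = f' + 1 := ⟨f - 1, by omega⟩
      obtain ⟨g', rfl⟩ : ∃ g', g = g' + 1 := ⟨g - 1, by omega⟩
      by_cases hocc : m <+: t.drop i
      · have hb : i + m.length ≤ t.length := occ_le hm hocc
        have hsw : PySem.Chars.startswith (t.drop i) m = true := (PySem.Chars.startswith_iff _ _).mpr hocc
        have hfind := findFrom_of_prefix (le_of_lt hlt) hocc
        simp only [aIterPositions, bGreedy, hfind, if_pos hb, hsw, if_true]
        rw [if_neg (by omega)]
        simp only [Int.toNat_natCast]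
        exact congrArg (i :: ·) (ih f' g' (i + m.length) (by omega) (by omega) (by omega) (by omega))
      · by_cases hb : i + m.length ≤ t.length
        · have hsw : ¬ (PySem.Chars.startswith (t.drop i) m = true) :=
            fun hs => hocc ((PySem.Chars.startswith_iff _ _).mp hs)
          rw [aIter_step (by omega) hocc]
          have hbg : bGreedy t m (g' + 1) i = bGreedy t m g' (i+1) := by
            simp only [bGreedy, if_pos hb]
            rw [if_neg hsw]
          rw [hbg]
          exact ih (f' + 1) g' (i+1) (by omega) (by omega) (by omega) (by omega)
        · have hno : PySem.Chars.findFrom t m (i : Int) none = -1 := by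
            rw [PySem.Chars.findFrom_natCast_eq_neg_one_iff t m i (by omega)]
            rw [infix_drop_iff]
            rintro ⟨j, hij, hp⟩
            exact hb (by have := occ_le hm hp; omega)
          simp only [aIterPositions, bGreedy, hno]
          rw [if_pos (by omega), if_neg hb]

-- bGreedy is empty once the marker no longer fits
lemma bGreedy_stuck {t m : List Char} {i : Nat} (h : t.length < i + m.length) :
    ∀ f, bGreedy t m f i = [] := by
  intro f
  cases f with
  | zero => rfl
  | succ f => simp only [bGreedy]; rw [if_neg (by omega)]

-- bGreedy does not depend on the fuel, given enough of it
lemma bGreedy_fuel {t m : List Char} (hm : m ≠ []) :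
    ∀ f g i, t.length + 1 - i ≤ f → t.length + 1 - i ≤ g →
      bGreedy t m f i = bGreedy t m g i := by
  have hL : 0 < m.length := List.length_pos_iff.mpr hm
  intro f
  induction f with
  | zero =>
    intro g i hf hg
    rw [bGreedy_stuck (by omega), bGreedy_stuck (by omega)]
  | succ f ih =>
    intro g i hf hg
    by_cases hfit : i + m.length ≤ t.length
    · obtain ⟨g', rfl⟩ : ∃ g', g = g' + 1 := ⟨g - 1, by omega⟩
      simp only [bGreedy, if_pos hfit]
      by_cases hsw : PySem.Chars.startswith (t.drop i) m = true
      · rw [if_pos hsw, if_pos hsw, ih g' (i + m.length) (by omega) (by omega)]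
      · rw [if_neg hsw, if_neg hsw, ih g' (i + 1) (by omega) (by omega)]
    · rw [bGreedy_stuck (by omega), bGreedy_stuck (by omega)]

-- the greedy scan from the current sweep state lists exactly the sweep-match indices:
-- bGreedy from max j (nextAt j) = the i ≥ j with matchesAt i
lemma greedy_eq_filter {t m : List Char} (hm : m ≠ []) :
    ∀ K j, t.length - j ≤ K →
      bGreedy t m (t.length + 1) (max j (nextAt t m j)) =
        (List.range' j (t.length - j)).filter (matchesAt t m) := by
  have hL : 0 < m.length := List.length_pos_iff.mpr hm
  intro K
  induction K with
  | zero =>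
    intro j hK
    have hj : t.length ≤ j := by omega
    have h0 : t.length - j = 0 := by omega
    rw [h0]
    rw [bGreedy_stuck (t := t) (m := m) (i := max j (nextAt t m j))
      (by have := le_max_left j (nextAt t m j); omega) (t.length + 1)]
    rfl
  | succ K ih =>
    intro j hK
    rcases Nat.lt_or_ge j t.length with hj | hj
    · have hsplit : t.length - j = (t.length - (j+1)) + 1 := by omega
      rw [hsplit, List.range'_succ, List.filter_cons]
      by_cases hmj : matchesAt t m j = true
      · have hcond : (decide (nextAt t m j ≤ j) && PySem.Chars.startswith (t.drop j) m) = true := hmj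
        have hle : nextAt t m j ≤ j := by
          have := Bool.and_elim_left hcond; simpa using this
        have hsw : PySem.Chars.startswith (t.drop j) m = true := Bool.and_elim_right hcond
        have hfit : j + m.length ≤ t.length := occ_le hm ((PySem.Chars.startswith_iff _ _).mp hsw)
        have hmax : max j (nextAt t m j) = j := by omega
        have hnext : nextAt t m (j+1) = j + m.length := by
          simp only [nextAt]; rw [if_pos hcond]
        have hmax' : max (j+1) (nextAt t m (j+1)) = j + m.length := by
          rw [hnext]; omega
        rw [hmax]
        show bGreedy t m (t.length + 1) j = _
        have hunf : bGreedy t m (t.length + 1) j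
            = j :: bGreedy t m t.length (j + m.length) := by
          simp only [bGreedy, if_pos hfit, hsw, if_true]
        have hih := ih (j+1) (by omega)
        rw [hmax'] at hih
        rw [hunf, bGreedy_fuel hm t.length (t.length + 1) (j + m.length) (by omega) (by omega), hih]
        simp [hmj]
      · have hnext : nextAt t m (j+1) = nextAt t m j := by
          simp only [nextAt]
          rw [if_neg (by simpa [matchesAt] using hmj)]
        rw [if_neg (by simp [hmj])]
        by_cases hle : nextAt t m j ≤ j
        · have hmax : max j (nextAt t m j) = j := by omega
          have hsw : ¬ PySem.Chars.startswith (t.drop j) m = true := by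
            intro hs
            exact hmj (by simp [matchesAt, hle, hs])
          by_cases hfit : j + m.length ≤ t.length
          · have hmax' : max (j+1) (nextAt t m (j+1)) = j + 1 := by
              rw [hnext]; omega
            rw [hmax]
            have hunf : bGreedy t m (t.length + 1) j = bGreedy t m t.length (j + 1) := by
              simp only [bGreedy, if_pos hfit]
              rw [if_neg hsw]
            have hih := ih (j+1) (by omega)
            rw [hmax'] at hih
            rw [hunf, bGreedy_fuel hm t.length (t.length + 1) (j + 1) (by omega) (by omega), hih]
          · -- marker no longer fits anywhere at or after j: both sides are empty
            rw [hmax, bGreedy_stuck (t := t) (m := m) (i := j) (by omega) (t.length + 1)]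
            symm
            rw [List.filter_eq_nil_iff]
            intro a ha
            have haj : j + 1 ≤ a := (List.mem_range'_1.mp ha).1
            intro hma
            have hswa : PySem.Chars.startswith (t.drop a) m = true := Bool.and_elim_right hma
            have := occ_le hm ((PySem.Chars.startswith_iff _ _).mp hswa)
            omega
        · have hmax : max j (nextAt t m j) = nextAt t m j := by omega
          have hmax' : max (j+1) (nextAt t m (j+1)) = nextAt t m j := by
            rw [hnext]; omega
          have hih := ih (j+1) (by omega)
          rw [hmax'] at hih
          rw [hmax, hih]
    · have h0 : t.length - j = 0 := by omega
      rw [h0]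
      rw [bGreedy_stuck (t := t) (m := m) (i := max j (nextAt t m j))
        (by have := le_max_left j (nextAt t m j); omega) (t.length + 1)]
      rfl

-- per marker: A's positions are exactly the sweep-match indices
lemma aIter_eq_filter {t m : List Char} (hm : m ≠ []) :
    aIterPositions t m (t.length + 1) 0 = (List.range t.length).filter (matchesAt t m) := by
  have h1 := scan_eq (t := t) (m := m) hm t.length (t.length + 1) (t.length + 1) 0 (by omega) (by omega) (by omega) (by omega)
  have h2 := greedy_eq_filter (t := t) (m := m) hm t.length 0 (by omega)
  simp only [nextAt, Nat.max_self, Nat.sub_zero] at h2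
  rw [h1, h2, List.range_eq_range']

-- the A-side fold over markers: nodup, members = union of per-marker positions
lemma foldl_set_spec (t : List Char) :
    ∀ (ms : List String) (s : PySem.Set Nat), s.Nodup →
      (ms.foldl (fun s m => (aIterPositions t m.toList (t.length + 1) 0).foldl PySem.Set.add s) s).Nodup ∧
      ∀ x, x ∈ ms.foldl (fun s m => (aIterPositions t m.toList (t.length + 1) 0).foldl PySem.Set.add s) s ↔
        x ∈ s ∨ ∃ m ∈ ms, x ∈ aIterPositions t m.toList (t.length + 1) 0 := by
  intro ms
  induction ms with
  | nil => intro s hs; simpa using hs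
  | cons m ms ih =>
    intro s hs
    have hstep : (aIterPositions t m.toList (t.length + 1) 0).foldl PySem.Set.add s
        = PySem.Set.update s (aIterPositions t m.toList (t.length + 1) 0) :=
      (PySem.Set.update_eq_foldl _ _).symm
    have hs' : (PySem.Set.update s (aIterPositions t m.toList (t.length + 1) 0)).Nodup :=
      PySem.Set.nodup_update _ _ hs
    obtain ⟨h1, h2⟩ := ih _ hs'
    simp only [List.foldl_cons, hstep]
    refine ⟨h1, fun x => ?_⟩
    rw [h2 x, PySem.Set.mem_update]
    simp only [List.exists_mem_cons_iff]
    tauto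

lemma strip_idem (s : List Char) :
    PySem.Chars.strip (PySem.Chars.strip s) = PySem.Chars.strip s := by
  unfold PySem.Chars.strip PySem.Chars.rstrip PySem.Chars.lstrip
  have idem := List.dropWhile_idempotent (α := Char)
  have fix : ∀ (z y : List Char), z <+: y → y.dropWhile PySem.Chars.isspace = y →
      z.dropWhile PySem.Chars.isspace = z := by
    intro z y hzy hy
    rw [List.dropWhile_eq_self_iff] at hy ⊢
    intro hl
    have hlen : 0 < y.length := lt_of_lt_of_le hl hzy.length_le
    have hg : z[0] = y[0] := by
      have := List.IsPrefix.getElem hzy (i := 0) hl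
      simpa using this
    rw [hg]; exact hy hlen
  set p := PySem.Chars.isspace
  set y := List.dropWhile p s with hy
  have h1 : (List.dropWhile p y.reverse).reverse <+: y := by
    have := (List.reverse_prefix (l₁ := List.dropWhile p y.reverse) (l₂ := y.reverse)).mpr (List.dropWhile_suffix p)
    simpa using this
  have h2 : List.dropWhile p ((List.dropWhile p y.reverse).reverse) = (List.dropWhile p y.reverse).reverse :=
    fix _ y h1 (idem p s)
  rw [h2, List.reverse_reverse, idem]

-- the flush step shared by A's split loop and B's sweep: append stripped t[prev:p], set prev = p
def flushStep (t : List Char) (st : List (List Char) × Nat) (p : Nat) : List (List Char) × Nat :=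
  let head := PySem.Chars.strip (PySem.List.slice t (some (st.2 : Int)) (some (p : Int)))
  (if head = [] then st.1 else st.1 ++ [head], p)

-- B's sweep decomposed: the state column is pointwise nextAt, and the segment column is
-- A's flush loop run over the cut indices (in increasing order)
lemma sweep_decomp (t : List Char) (ms : List (List Char)) : ∀ (n : Nat),
    (List.range n).foldl
      (fun (st : List (Nat × List Char) × List (List Char) × Nat) i =>
        if st.1.any (fun nm => decide (nm.1 ≤ i) && PySem.Chars.startswith (t.drop i) nm.2) then
          (st.1.map (fun nm => if decide (nm.1 ≤ i) && PySem.Chars.startswith (t.drop i) nm.2 then (i + nm.2.length, nm.2) else nm),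
           if 0 < i then
             (let head := PySem.Chars.strip (PySem.List.slice t (some (st.2.2 : Int)) (some (i : Int)))
              (if head = [] then st.2.1 else st.2.1 ++ [head], i))
           else st.2)
        else st)
      (ms.map (fun m => ((0 : Nat), m)), ([], 0))
    = (ms.map (fun m => (nextAt t m n, m)),
       ((List.range n).filter (fun i => cutB t ms i && decide (0 < i))).foldl
         (flushStep t) ([], 0)) := by
  intro n
  induction n with
  | zero => simp [nextAt]
  | succ n ih =>
    rw [List.range_succ, List.foldl_append, List.filter_append, List.foldl_append, ih]
    simp only [List.foldl_cons, List.foldl_nil, List.filter_cons, List.filter_nil]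
    have hany : (ms.map (fun m => (nextAt t m n, m))).any
        (fun nm => decide (nm.1 ≤ n) && PySem.Chars.startswith (t.drop n) nm.2) = cutB t ms n := by
      rw [List.any_map]
      rfl
    by_cases hcut : cutB t ms n = true
    · rw [hany, hcut, if_pos rfl]
      have hstate : (ms.map (fun m => (nextAt t m n, m))).map
          (fun nm => if decide (nm.1 ≤ n) && PySem.Chars.startswith (t.drop n) nm.2 then (n + nm.2.length, nm.2) else nm)
          = ms.map (fun m => (nextAt t m (n+1), m)) := by
        rw [List.map_map]
        apply List.map_congr_left
        intro m _
        simp only [Function.comp]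
        by_cases hc : (decide (nextAt t m n ≤ n) && PySem.Chars.startswith (t.drop n) m) = true
        · rw [if_pos hc]
          simp only [nextAt]
          rw [if_pos hc]
        · rw [if_neg hc]
          simp only [nextAt]
          rw [if_neg hc]
      rw [hstate]
      by_cases hpos : 0 < n
      · rw [if_pos hpos]
        simp only [hpos, decide_true, Bool.and_self, if_pos]
        simp [flushStep]
      · rw [if_neg hpos]
        simp [hpos]
    · have hcf : cutB t ms n = false := by
        revert hcut; cases cutB t ms n <;> simp
      rw [hany, hcf]
      simp only [Bool.false_eq_true, if_false, Bool.false_and]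
      have hstate : ms.map (fun m => (nextAt t m n, m)) = ms.map (fun m => (nextAt t m (n+1), m)) := by
        apply List.map_congr_left
        intro m hmm
        have hm : matchesAt t m n = false := by
          by_contra hc
          have : cutB t ms n = true := List.any_eq_true.mpr ⟨m, hmm, by simpa using hc⟩
          rw [this] at hcf; exact Bool.true_eq_false ▸ hcf
        simp only [nextAt]
        rw [if_neg (by simpa [matchesAt] using hm)]
      rw [← hstate]
      simp

-- ===== VERDICT (by name: the statement is the Claim_ definition above) =====
theorem build_segments_keep_markers_py_spec : Claim_equal_build_segments_keep_markers_py := by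
  intro text markers hdom hpre
  unfold Pre_build_segments_keep_markers_py at hpre
  unfold Spec_build_segments_keep_markers_py
  unfold build_segments_keep_markers_py build_segments_keep_markers_py_alt
  dsimp only
  by_cases h0 : PySem.Chars.strip text.toList = []
  · simp only [if_pos h0]
  · simp only [if_neg h0]
    rcases hpre with htriv | hpre
    · exact absurd htriv h0
    set t := PySem.Chars.strip text.toList with ht
    have hstript : PySem.Chars.strip t = t := by rw [ht]; exact strip_idem _
    -- rewrite B's initial state and apply the sweep decomposition
    have hinit : markers.map (fun m => ((0 : Nat), m.toList))
        = (markers.map String.toList).map (fun m => ((0 : Nat), m)) := by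
      rw [List.map_map]
      rfl
    rw [hinit, sweep_decomp t (markers.map String.toList) t.length]
    set ms := markers.map String.toList with hms
    set C := (List.range t.length).filter (fun i => cutB t ms i && decide (0 < i)) with hC
    -- A's cut set members = B's cut indices
    obtain ⟨hAnd, hAmem⟩ := foldl_set_spec t markers PySem.Set.empty (by simp [PySem.Set.empty])
    set PA := List.foldl (fun s m => List.foldl PySem.Set.add s (aIterPositions t m.toList (t.length + 1) 0)) PySem.Set.empty markers with hPAd
    have hmem : ∀ x, x ∈ PA ↔ (x ∈ List.range t.length ∧ cutB t ms x = true) := by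
      intro x
      rw [hAmem x]
      simp only [PySem.Set.empty, List.not_mem_nil, false_or]
      constructor
      · rintro ⟨m, hmm, hx⟩
        have hmne : m.toList ≠ [] := fun hc => (hpre m hmm) (String.toList_eq_nil_iff.mp hc)
        rw [aIter_eq_filter hmne] at hx
        have := List.mem_filter.mp hx
        refine ⟨this.1, ?_⟩
        exact List.any_eq_true.mpr ⟨m.toList, List.mem_map.mpr ⟨m, hmm, rfl⟩, this.2⟩
      · rintro ⟨hxr, hcut⟩
        obtain ⟨m', hm', hma⟩ := List.any_eq_true.mp hcut
        obtain ⟨m, hmm, rfl⟩ := List.mem_map.mp hm'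
        have hmne : m.toList ≠ [] := fun hc => (hpre m hmm) (String.toList_eq_nil_iff.mp hc)
        refine ⟨m, hmm, ?_⟩
        rw [aIter_eq_filter hmne]
        exact List.mem_filter.mpr ⟨hxr, hma⟩
    have hCpw : List.Pairwise (· < ·) C := List.Pairwise.filter _ (List.pairwise_lt_range)
    have hkey : PySem.List.sorted (PA.filter (fun p => decide (0 < p))) (fun x => x) false = C := by
      apply PySem.List.sorted_eq_of_perm_of_pairwise_lt
      · rw [List.perm_ext_iff_of_nodup (hCpw.imp (fun h => ne_of_lt h)) (hAnd.filter _)]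
        intro a
        rw [hC]
        simp only [List.mem_filter, Bool.and_eq_true, decide_eq_true_eq]
        rw [hmem a]
        tauto
      · exact hCpw
    by_cases hPAe : PA = []
    · have hCe : C = [] := by
        rw [hC]
        rw [List.filter_eq_nil_iff]
        intro a ha hcond
        have : a ∈ PA := (hmem a).mpr ⟨ha, (by have := Bool.and_elim_left hcond; exact this)⟩
        rw [hPAe] at this
        simp at this
      rw [if_pos hPAe, hCe]
      simp only [List.foldl_nil]
      rw [PySem.List.slice_from_natCast]
      simp only [List.drop_zero]
      rw [hstript]
      simp [h0]
    · rw [if_neg hPAe]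
      by_cases hCe : (PySem.List.sorted (PA.filter (fun p => decide (0 < p))) (fun x => x) false) = []
      · rw [if_pos hCe]
        rw [hkey] at hCe
        rw [hCe]
        simp only [List.foldl_nil]
        rw [PySem.List.slice_from_natCast]
        simp only [List.drop_zero]
        rw [hstript]
        simp [h0]
      · rw [if_neg hCe, hkey]
        rfl
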